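-- pv_equiv track=rewrite | github.com/RishiGit/cs440 | mp4/viterbi.py | viterbi_p1
-- ===== SOURCE A (Python) =====
-- def viterbi_p1(train, test):
--     '''
--     TODO: implement the simple Viterbi algorithm. This function has time out limitation for 3 mins.
--     input:  training data (list of sentences, with myval2 on the words)
--             E.g. [[(word1, tag1), (word2, tag2)], [(word3, tag3), (word4, tag4)]]
--             test data (list of sentences, no myval2 on the words)
--             E.g [[word1,word2...]]
--     output: list of sentences with myval2 on the words
--             E.g. [[(word1, tag1), (word2, tag2)...], [(word1, tag1), (word2, tag2)...]...]
--     '''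
--     tagger = {}
--     myTag = {}
--     myRank = []
--     dictionary = {}
--     final_return = []
--
--     for myWord in train:
--
--         for the_word in myWord:
--
--            if the_word[1] in myTag:
--                 myTag[the_word[1]] += 1
--            elif the_word[1] not in myTag:
--                 myTag[the_word[1]] = 1
--
--            if the_word in tagger:
--                 tagger[the_word] += 1
--            elif the_word not in tagger:
--                 tagger[the_word] = 1
--
--     for tag in tagger:
--
--         if tag[0] in dictionary:
--            dictionary[tag[0]].append((tag[1], tagger.get(tag)))
--         elif tag[0] not in dictionary:
--            dictionary[tag[0]] = []
--            dictionary[tag[0]].append((tag[1], tagger.get(tag)))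
--
--     for myval2 in myTag:
--         myRank.append((myval2, myTag.get(myval2)))
--
--     for words in dictionary:
--         dictionary.get(words).sort(key=lambda x:x[1])
--
--     myRank.sort(key=lambda x:x[1])
--     for myWord in test:
--
--         holder = []
--
--         for word in myWord:
--
--             if word in dictionary:
--                 final_tag = dictionary.get(word)[len(dictionary.get(word))-1][0]
--                 holder.append((word, final_tag))
--             elif word not in dictionary:
--                 final_tag = myRank[len(myRank)-1][0]
--                 holder.append((word, final_tag))
--
--         final_return.append(holder)
--
--     return final_return
-- ===== SOURCE B (Python) =====
-- def viterbi_p1(train, test):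
--     '''Most-frequent-tag baseline: one training pass over nested per-word tag
--     counts, best tags picked by a >=-scan in insertion order (no sorting).'''
--     tag_counts = {}
--     word_counts = {}
--     for sentence in train:
--         for word, tag in sentence:
--             tag_counts[tag] = tag_counts.get(tag, 0) + 1
--             per_word = word_counts.setdefault(word, {})
--             per_word[tag] = per_word.get(tag, 0) + 1
--
--     def best(counts):
--         top = None
--         for pair in counts.items():
--             if top is None or top[1] <= pair[1]:
--                 top = pair
--         return top[0] if top is not None else ''
--
--     fallback = best(tag_counts)
--     return [[(word, best(word_counts[word]) if word in word_counts else fallback)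
--              for word in sentence] for sentence in test]
-- ===== Notes on version B (the rewrite author's own statement) =====
-- stated objective: simpler
-- what changed: One training pass over a nested per-word tag-count dict plus a global tag counter, with best tags picked by a single >=-scan in insertion order, replacing A's (word,tag)-tuple dict, regrouping pass and per-word stable sorts.
import Mathlib
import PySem

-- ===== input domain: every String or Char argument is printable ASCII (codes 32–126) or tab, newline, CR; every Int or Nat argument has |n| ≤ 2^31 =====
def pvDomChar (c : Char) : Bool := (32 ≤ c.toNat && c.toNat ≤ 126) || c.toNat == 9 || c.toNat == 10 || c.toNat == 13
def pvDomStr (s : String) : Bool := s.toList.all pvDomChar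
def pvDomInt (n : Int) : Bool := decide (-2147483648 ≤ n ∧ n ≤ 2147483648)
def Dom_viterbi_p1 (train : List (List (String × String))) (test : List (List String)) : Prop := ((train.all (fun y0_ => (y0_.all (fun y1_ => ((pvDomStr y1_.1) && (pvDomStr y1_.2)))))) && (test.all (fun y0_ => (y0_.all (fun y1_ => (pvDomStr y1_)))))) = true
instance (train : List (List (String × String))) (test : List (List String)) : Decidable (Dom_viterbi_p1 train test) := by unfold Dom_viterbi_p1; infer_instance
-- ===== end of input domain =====

-- B replaces A's (word,tag)-tuple dict, regrouping pass and per-word stable sorts by one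
-- nested-dict training pass and a >=-scan for best tags (objective: simpler).


-- ===== PORT A =====
-- Literal transliteration of Source A. Python's in-place list append / .sort() on a dict value is
-- ported as Dict.modify / re-insert of the same key (overwrite keeps position, exact);
-- tagger.get(tag) / myTag.get(myval2) are ported as getD _ 0 (exact: the key is present).
-- The out-of-range index myRank[-1] (empty train, unknown test word → Python IndexError) is
-- pyGet? = none; its .getD ("", 0) is never reached inside Pre_viterbi_p1.
def viterbi_p1 (train : List (List (String × String))) (test : List (List String)) : List (List (String × String)) :=
  let st := train.foldl (fun (st : PySem.Dict (String × String) Int × PySem.Dict String Int) myWord =>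
    myWord.foldl (fun st the_word =>
      let myTag := if st.2.contains the_word.2 then st.2.insert the_word.2 (st.2.getD the_word.2 0 + 1)
                   else st.2.insert the_word.2 1
      let tagger := if st.1.contains the_word then st.1.insert the_word (st.1.getD the_word 0 + 1)
                    else st.1.insert the_word 1
      (tagger, myTag)) st) (PySem.Dict.empty, PySem.Dict.empty)
  let tagger := st.1
  let myTag := st.2
  let dictionary := tagger.keys.foldl (fun d tag =>
    if d.contains tag.1 then d.modify tag.1 [] (· ++ [(tag.2, tagger.getD tag 0)])
    else (d.insert tag.1 []).modify tag.1 [] (· ++ [(tag.2, tagger.getD tag 0)])) PySem.Dict.empty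
  let myRank := myTag.keys.foldl (fun r myval2 => r ++ [(myval2, myTag.getD myval2 0)]) []
  let dictionary2 := dictionary.keys.foldl (fun d words =>
    d.insert words (PySem.List.sorted (d.getD words []) (fun x => x.2) false)) dictionary
  let myRank2 := PySem.List.sorted myRank (fun x => x.2) false
  test.foldl (fun fr myWord =>
    let holder := myWord.foldl (fun h word =>
      if dictionary2.contains word then
        let lst := dictionary2.getD word []
        h ++ [(word, ((PySem.List.pyGet? lst ((lst.length : Int) - 1)).getD ("", 0)).1)]
      else
        h ++ [(word, ((PySem.List.pyGet? myRank2 ((myRank2.length : Int) - 1)).getD ("", 0)).1)]) []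
    fr ++ [holder]) []

-- ===== PORT B =====
-- Literal transliteration of Source B. word_counts.setdefault(word, {}) followed by the in-place
-- sub-dict update is Dict.modify with default Dict.empty (exact).
def pvBest (counts : List (String × Int)) : String :=
  let top := counts.foldl (fun top pair =>
    match top with
    | none => some pair
    | some t => if t.2 ≤ pair.2 then some pair else some t) (none : Option (String × Int))
  match top with
  | some t => t.1
  | none => ""

def viterbi_p1_alt (train : List (List (String × String))) (test : List (List String)) : List (List (String × String)) :=
  let st := train.foldl (fun (st : PySem.Dict String Int × PySem.Dict String (PySem.Dict String Int)) sentence =>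
    sentence.foldl (fun st wt =>
      let tc := st.1.insert wt.2 (st.1.getD wt.2 0 + 1)
      let wc := st.2.modify wt.1 PySem.Dict.empty (fun pw => pw.insert wt.2 (pw.getD wt.2 0 + 1))
      (tc, wc)) st) (PySem.Dict.empty, PySem.Dict.empty)
  let fallback := pvBest st.1.items
  test.map (fun sentence => sentence.map (fun word =>
    (word, match st.2.get? word with
           | some pw => pvBest pw.items
           | none => fallback)))

-- ===== PRECONDITION & SPEC =====
-- Pre_ excludes exactly the inputs on which A raises IndexError (myRank[-1] on an empty rank
-- list): a train with no (word, tag) pairs together with a test containing at least one word.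
def Pre_viterbi_p1 (train : List (List (String × String))) (test : List (List String)) : Prop :=
  train.flatten ≠ [] ∨ test.flatten = []
instance (train : List (List (String × String))) (test : List (List String)) : Decidable (Pre_viterbi_p1 train test) := by unfold Pre_viterbi_p1; infer_instance
def pvWitness_viterbi_p1 : (List (List (String × String))) × List (List String) :=
  ([[("the", "D"), ("dog", "N")], [("the", "D")]], [["the", "dog", "cat"]])
def Spec_viterbi_p1 (train : List (List (String × String))) (test : List (List String)) (out : List (List (String × String))) : Prop := out = viterbi_p1_alt train test
instance (train : List (List (String × String))) (test : List (List String)) (out : List (List (String × String))) : Decidable (Spec_viterbi_p1 train test out) := by unfold Spec_viterbi_p1; infer_instance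

-- ===== CLAIM (what is proved, stated in full; the proofs are below) =====
def Claim_equal_viterbi_p1 : Prop := ∀ (train : List (List (String × String))) (test : List (List String)), Dom_viterbi_p1 train test → Pre_viterbi_p1 train test → Spec_viterbi_p1 train test (viterbi_p1 train test)


-- ===== LEMMAS AND PROOFS =====

-- the >=-scan step of pvBest, as a named function
def pvStep (top : Option (String × Int)) (pair : String × Int) : Option (String × Int) :=
  match top with
  | none => some pair
  | some t => if t.2 ≤ pair.2 then some pair else some t

theorem pvBest_def (l : List (String × Int)) :
    pvBest l = match l.foldl pvStep none with | some t => t.1 | none => "" := rfl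

theorem pvInsertBy_ne_nil (b : (String × Int) → (String × Int) → Bool) (x : String × Int)
    (s : List (String × Int)) : PySem.List.insertBy b x s ≠ [] := by
  cases s with
  | nil => simp [PySem.List.insertBy]
  | cons y ys => simp only [PySem.List.insertBy]; split <;> simp

theorem getLast?_insertBy (x : String × Int) (s : List (String × Int))
    (hs : s.Pairwise (fun a b => a.2 ≤ b.2)) :
    (PySem.List.insertBy (fun a b => decide (a.2 < b.2)) x s).getLast? = pvStep s.getLast? x := by
  induction s with
  | nil => simp [PySem.List.insertBy, pvStep]
  | cons y ys ih =>
    simp only [PySem.List.insertBy]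
    by_cases hxy : x.2 < y.2
    · simp only [hxy, decide_true, if_true]
      rw [List.getLast?_cons_cons]
      obtain ⟨m, hm⟩ : ∃ m, (y :: ys).getLast? = some m := ⟨_, List.getLast?_cons⟩
      have hmem : m ∈ y :: ys := List.mem_of_getLast? hm
      have hym : y.2 ≤ m.2 := by
        rcases List.mem_cons.1 hmem with h | h
        · rw [h]
        · exact (List.pairwise_cons.1 hs).1 m h
      rw [hm]
      simp only [pvStep]
      rw [if_neg (by omega)]
    · rw [if_neg (by simp [hxy])]
      have hne := pvInsertBy_ne_nil (fun a b => decide (a.2 < b.2)) x ys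
      obtain ⟨z, zs, hz⟩ := List.exists_cons_of_ne_nil hne
      rw [hz, List.getLast?_cons_cons, ← hz, ih (List.pairwise_cons.1 hs).2]
      cases ys with
      | nil =>
        simp only [pvStep, List.getLast?_nil, List.getLast?_singleton]
        rw [if_pos (by omega)]
      | cons c cs => rw [List.getLast?_cons_cons]

theorem sorted_getLast? (l : List (String × Int)) :
    (PySem.List.sorted l (fun x => x.2)).getLast? = l.foldl pvStep none := by
  rw [PySem.List.sorted_eq_foldl_insertBy]
  induction l using List.reverseRecOn with
  | nil => simp
  | append_singleton ys x ih =>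
    rw [List.foldl_append, List.foldl_append, List.foldl_cons, List.foldl_nil, ← ih]
    rw [← PySem.List.sorted_eq_foldl_insertBy]
    exact getLast?_insertBy x _ (PySem.List.sorted_pairwise ys (fun x => x.2))

theorem pyGet?_last {a : Type} (s : List a) :
    PySem.List.pyGet? s ((s.length : Int) - 1) = s.getLast? := by
  cases s with
  | nil => simp [PySem.List.pyGet?]
  | cons x xs =>
    have h : ((x :: xs).length : Int) - 1 = ((xs.length : Nat) : Int) := by
      simp [List.length_cons]
    rw [h, PySem.List.pyGet?_natCast, List.getLast?_eq_getElem?]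
    simp

-- A\'s "last element of the value-sorted list" equals B\'s >=-scan, including on []
theorem best_eq (l : List (String × Int)) :
    ((PySem.List.pyGet? (PySem.List.sorted l (fun x => x.2))
        (((PySem.List.sorted l (fun x => x.2)).length : Int) - 1)).getD ("", 0)).1 = pvBest l := by
  rw [pyGet?_last, sorted_getLast?, pvBest_def]
  cases h : l.foldl pvStep none <;> simp [h]

-- collapse A\'s membership-tested counting branch into the unconditional insert step
theorem count_step_collapse {k : Type} [BEq k] [LawfulBEq k] :
    (fun (d : PySem.Dict k Int) (x : k) =>
        if d.contains x then d.insert x (d.getD x 0 + 1) else d.insert x 1) =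
    (fun (d : PySem.Dict k Int) (x : k) => d.insert x (d.getD x 0 + 1)) := by
  funext d x
  by_cases h : d.contains x
  · simp [h]
  · have h0 : d.getD x 0 = 0 := PySem.Dict.getD_of_not_contains d 0 (by simp [h])
    rw [if_neg h, h0]
    norm_num

theorem counter_fold {k : Type} [BEq k] [LawfulBEq k] (l : List k) :
    l.foldl (fun (d : PySem.Dict k Int) x =>
        if d.contains x then d.insert x (d.getD x 0 + 1) else d.insert x 1) PySem.Dict.empty
      = PySem.Dict.counter l := by
  rw [count_step_collapse, PySem.Dict.foldl_insert_getD_add_one_eq_counter]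

-- nested getD through B\'s keyed modify loop
theorem wc_getD (l : List (String × String)) (d : PySem.Dict String (PySem.Dict String Int)) (w : String) :
    (l.foldl (fun d p => d.modify p.1 PySem.Dict.empty
        (fun pw => pw.insert p.2 (pw.getD p.2 0 + 1))) d).getD w PySem.Dict.empty
    = (l.filter (fun p => p.1 == w)).foldl
        (fun pw p => pw.insert p.2 (pw.getD p.2 0 + 1)) (d.getD w PySem.Dict.empty) := by
  induction l generalizing d with
  | nil => simp
  | cons p l ih =>
    rw [List.foldl_cons, ih]
    by_cases h : p.1 = w
    · rw [List.filter_cons_of_pos (by simp [h]), List.foldl_cons,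
        PySem.Dict.getD_modify, if_pos h.symm, h]
    · rw [List.filter_cons_of_neg (by simp [h]),
        PySem.Dict.getD_modify, if_neg (fun hh => h hh.symm)]

theorem wc_getD_counter (l : List (String × String)) (w : String) :
    (l.foldl (fun d p => d.modify p.1 PySem.Dict.empty
        (fun pw => pw.insert p.2 (pw.getD p.2 0 + 1))) PySem.Dict.empty).getD w PySem.Dict.empty
    = PySem.Dict.counter ((l.filter (fun p => p.1 == w)).map (fun p => p.2)) := by
  rw [wc_getD, PySem.Dict.getD_empty, ← PySem.Dict.foldl_insert_getD_add_one_eq_counter,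
    List.foldl_map]

-- A\'s regrouping loop: both branches are one modify (modify = insert of the appended value)
theorem dict_step_collapse (g : (String × String) → Int)
    (d : PySem.Dict String (List (String × Int))) (tag : String × String) :
    (if d.contains tag.1 then d.modify tag.1 [] (· ++ [(tag.2, g tag)])
     else (d.insert tag.1 []).modify tag.1 [] (· ++ [(tag.2, g tag)]))
    = d.modify tag.1 [] (· ++ [(tag.2, g tag)]) := by
  by_cases h : d.contains tag.1
  · simp [h]
  · have h0 : d.getD tag.1 [] = [] := PySem.Dict.getD_of_not_contains d [] (by simp [h])
    rw [if_neg h]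
    simp only [PySem.Dict.modify, PySem.Dict.getD_insert_self, PySem.Dict.insert_insert_self, h0]

theorem dictA_getD (g : (String × String) → Int) (ks : List (String × String)) (w : String) :
    (ks.foldl (fun d tag =>
        if d.contains tag.1 then d.modify tag.1 [] (· ++ [(tag.2, g tag)])
        else (d.insert tag.1 []).modify tag.1 [] (· ++ [(tag.2, g tag)])) PySem.Dict.empty).getD w []
    = (ks.filter (fun k => k.1 == w)).map (fun k => (k.2, g k)) := by
  have hcol : (fun (d : PySem.Dict String (List (String × Int))) (tag : String × String) =>
      if d.contains tag.1 then d.modify tag.1 [] (· ++ [(tag.2, g tag)])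
      else (d.insert tag.1 []).modify tag.1 [] (· ++ [(tag.2, g tag)]))
      = fun d tag => d.modify tag.1 [] (· ++ [(tag.2, g tag)]) := by
    funext d tag; exact dict_step_collapse g d tag
  rw [hcol]
  have hmap : (ks.foldl (fun d (tag : String × String) =>
      d.modify tag.1 [] (· ++ [(tag.2, g tag)])) PySem.Dict.empty)
      = (ks.map (fun k => (k.1, (k.2, g k)))).foldl
          (fun d p => d.modify p.1 [] (fun x => x ++ [p.2])) PySem.Dict.empty := by
    rw [List.foldl_map]
  rw [hmap, PySem.Dict.getD_foldl_modify_append, List.filter_map]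
  simp [Function.comp_def, List.map_map]

theorem dictA_contains (g : (String × String) → Int) (ks : List (String × String))
    (d : PySem.Dict String (List (String × Int))) (w : String) :
    (ks.foldl (fun d tag =>
        if d.contains tag.1 then d.modify tag.1 [] (· ++ [(tag.2, g tag)])
        else (d.insert tag.1 []).modify tag.1 [] (· ++ [(tag.2, g tag)])) d).contains w
    = (d.contains w || ks.any (fun k => k.1 == w)) := by
  induction ks generalizing d with
  | nil => simp
  | cons p ks ih =>
    rw [List.foldl_cons, dict_step_collapse, ih, List.any_cons, PySem.Dict.contains_modify]
    by_cases hwp : w = p.1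
    · simp [hwp]
    · have h1 : (w == p.1) = false := beq_eq_false_iff_ne.mpr hwp
      have h2 : (p.1 == w) = false := beq_eq_false_iff_ne.mpr (Ne.symm hwp)
      simp [h1, h2]

-- the value-sorting pass: getD of the rebuilt dict
theorem sortFold_getD (ks : List String) (hnd : ks.Nodup)
    (d : PySem.Dict String (List (String × Int))) (w : String) :
    (ks.foldl (fun d k => d.insert k (PySem.List.sorted (d.getD k []) (fun x => x.2))) d).getD w []
    = if w ∈ ks then PySem.List.sorted (d.getD w []) (fun x => x.2) else d.getD w [] := by
  induction ks generalizing d with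
  | nil => simp
  | cons k ks ih =>
    rw [List.foldl_cons, ih (List.nodup_cons.1 hnd).2]
    by_cases hw : w ∈ ks
    · have hwk : w ≠ k := fun h => (List.nodup_cons.1 hnd).1 (h ▸ hw)
      rw [if_pos hw, if_pos (List.mem_cons_of_mem _ hw), PySem.Dict.getD_insert, if_neg hwk]
    · rw [if_neg hw]
      by_cases hwk : w = k
      · rw [if_pos (by simp [hwk]), PySem.Dict.getD_insert, if_pos hwk, hwk]
      · rw [if_neg (by simp [hwk, hw]), PySem.Dict.getD_insert, if_neg hwk]

theorem sortFold_contains (ks : List String)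
    (d : PySem.Dict String (List (String × Int))) (w : String)
    (h : ∀ k ∈ ks, d.contains k = true) :
    (ks.foldl (fun d k => d.insert k (PySem.List.sorted (d.getD k []) (fun x => x.2))) d).contains w
    = d.contains w := by
  induction ks generalizing d with
  | nil => rfl
  | cons k ks ih =>
    rw [List.foldl_cons, ih]
    · rw [PySem.Dict.contains_insert]
      cases hwk : (w == k)
      · simp
      · simp [show w = k from by simpa using hwk, h k (List.mem_cons_self)]
    · intro x hx
      rw [PySem.Dict.contains_insert]
      simp [h x (List.mem_cons_of_mem _ hx)]

-- filtering commutes with set(…) (first-occurrence dedup)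
theorem ofList_filter_aux {a : Type} [BEq a] [LawfulBEq a] (q : a → Bool) (l : List a)
    (s : List a) :
    (l.filter q).foldl PySem.Set.add (s.filter q) = (l.foldl PySem.Set.add s).filter q := by
  induction l generalizing s with
  | nil => rfl
  | cons x l ih =>
    rw [List.foldl_cons]
    by_cases hq : q x
    · rw [List.filter_cons_of_pos hq, List.foldl_cons, ← ih]
      congr 1
      simp only [PySem.Set.add, PySem.Set.contains, List.contains_iff_mem, List.mem_filter]
      by_cases hm : x ∈ s
      · rw [if_pos (by simp [hm, hq]), if_pos (by simp [hm])]
      · rw [if_neg (by simp [hm]), if_neg (by simp [hm]), List.filter_append,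
          List.filter_cons_of_pos hq]
        rfl
    · rw [List.filter_cons_of_neg hq, ← ih]
      congr 1
      simp only [PySem.Set.add]
      by_cases hm : PySem.Set.contains s x
      · rw [if_pos hm]
      · rw [if_neg hm, List.filter_append, List.filter_cons_of_neg hq,
          List.filter_nil, List.append_nil]

theorem ofList_filter {a : Type} [BEq a] [LawfulBEq a] (q : a → Bool) (l : List a) :
    PySem.Set.ofList (l.filter q) = (PySem.Set.ofList l).filter q := by
  have := ofList_filter_aux q l []
  simpa [PySem.Set.ofList, PySem.Set.empty] using this

-- set(…) commutes with the second projection on pairs whose first component is fixed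
theorem ofList_map_snd_aux (w : String) (m : List (String × String)) (s : List (String × String))
    (hm : ∀ p ∈ m, p.1 = w) (hs : ∀ p ∈ s, p.1 = w) :
    (m.map (fun p => p.2)).foldl PySem.Set.add (s.map (fun p => p.2))
    = (m.foldl PySem.Set.add s).map (fun p => p.2) := by
  induction m generalizing s with
  | nil => rfl
  | cons p m ih =>
    rw [List.map_cons, List.foldl_cons, List.foldl_cons]
    have hp : p.1 = w := hm p (List.mem_cons_self)
    have hadd : PySem.Set.add (s.map (fun p => p.2)) p.2 = (PySem.Set.add s p).map (fun p => p.2) := by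
      simp only [PySem.Set.add]
      by_cases hmem : p ∈ s
      · have c1 : PySem.Set.contains (s.map (fun p => p.2)) p.2 = true := by
          simp only [PySem.Set.contains, List.contains_iff_mem]
          exact List.mem_map_of_mem hmem
        have c2 : PySem.Set.contains s p = true := by
          simp only [PySem.Set.contains, List.contains_iff_mem]
          exact hmem
        rw [if_pos c1, if_pos c2]
      · have c1 : PySem.Set.contains (s.map (fun p => p.2)) p.2 = false := by
          rw [Bool.eq_false_iff]
          intro hcon
          have hmm2 : p.2 ∈ s.map (fun q => q.2) := by
            simpa [PySem.Set.contains, List.contains_iff_mem] using hcon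
          obtain ⟨x, hx, hx2⟩ := List.mem_map.1 hmm2
          exact hmem (by
            have hxp : x = p := Prod.ext (by rw [hs x hx, hp]) hx2
            rwa [← hxp])
        have c2 : PySem.Set.contains s p = false := by
          rw [Bool.eq_false_iff]
          intro hcon
          exact hmem (by simpa [PySem.Set.contains, List.contains_iff_mem] using hcon)
        rw [if_neg (by rw [c1]; simp), if_neg (by rw [c2]; simp), List.map_append]
        rfl
    rw [hadd, ih _ (fun x hx => hm x (List.mem_cons_of_mem _ hx))]
    intro x hx
    simp only [PySem.Set.add] at hx
    split at hx
    · exact hs x hx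
    · rcases List.mem_append.1 hx with h | h
      · exact hs x h
      · simp at h; rw [h, hp]

theorem ofList_map_snd (w : String) (m : List (String × String)) (hm : ∀ p ∈ m, p.1 = w) :
    PySem.Set.ofList (m.map (fun p => p.2)) = (PySem.Set.ofList m).map (fun p => p.2) := by
  have := ofList_map_snd_aux w m [] hm (by simp)
  simpa [PySem.Set.ofList, PySem.Set.empty] using this

theorem count_tags (ps : List (String × String)) (w t : String) :
    ((ps.filter (fun p => p.1 == w)).map (fun p => p.2)).count t = ps.count (w, t) := by
  rw [List.count_eq_countP, List.countP_map, List.count_eq_countP, List.countP_filter]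
  apply List.countP_congr
  intro p _
  simp only [Function.comp_apply, beq_iff_eq, Bool.and_eq_true, Prod.ext_iff]
  constructor
  · rintro ⟨h2, h1⟩; exact ⟨h1, h2⟩
  · rintro ⟨h1, h2⟩; exact ⟨h2, h1⟩


theorem dictA_nodup (g : (String × String) → Int) (ks : List (String × String)) :
    (ks.foldl (fun d tag =>
        if d.contains tag.1 then d.modify tag.1 [] (· ++ [(tag.2, g tag)])
        else (d.insert tag.1 []).modify tag.1 [] (· ++ [(tag.2, g tag)])) PySem.Dict.empty).keys.Nodup := by
  have hcol : (fun (d : PySem.Dict String (List (String × Int))) (tag : String × String) =>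
      if d.contains tag.1 then d.modify tag.1 [] (· ++ [(tag.2, g tag)])
      else (d.insert tag.1 []).modify tag.1 [] (· ++ [(tag.2, g tag)]))
      = fun d tag => d.modify tag.1 [] (· ++ [(tag.2, g tag)]) := by
    funext d tag; exact dict_step_collapse g d tag
  rw [hcol]
  exact PySem.Dict.nodup_keys_foldl_modify_key ks (fun tag => tag.1) []
    (fun _ tag => fun v => v ++ [(tag.2, g tag)]) PySem.Dict.empty (by simp)

-- 'if c: out.append(g1) else: out.append(g2)' is one append of an if
theorem foldl_if_append (c : String → Bool) (g1 g2 : String → String × String)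
    (l : List String) (acc : List (String × String)) :
    l.foldl (fun h word => if c word then h ++ [g1 word] else h ++ [g2 word]) acc
    = acc ++ l.map (fun word => if c word then g1 word else g2 word) := by
  induction l generalizing acc with
  | nil => simp
  | cons x l ih => by_cases hc : c x <;> simp [hc, ih]

-- the per-word tag A computes equals the per-word tag B computes
theorem word_eq (ps : List (String × String)) (w : String) :
    (let tagger := PySem.Dict.counter ps
     let dictionary := tagger.keys.foldl (fun d tag =>
        if d.contains tag.1 then d.modify tag.1 [] (· ++ [(tag.2, tagger.getD tag 0)])
        else (d.insert tag.1 []).modify tag.1 [] (· ++ [(tag.2, tagger.getD tag 0)])) PySem.Dict.empty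
     let dictionary2 := dictionary.keys.foldl (fun d words =>
        d.insert words (PySem.List.sorted (d.getD words []) (fun x => x.2))) dictionary
     let myTag := PySem.Dict.counter (ps.map (fun p => p.2))
     let myRank2 := PySem.List.sorted (myTag.keys.map (fun k => (k, myTag.getD k 0))) (fun x => x.2)
     if dictionary2.contains w then
       (w, ((PySem.List.pyGet? (dictionary2.getD w []) (((dictionary2.getD w []).length : Int) - 1)).getD ("", 0)).1)
     else
       (w, ((PySem.List.pyGet? myRank2 ((myRank2.length : Int) - 1)).getD ("", 0)).1))
    = (w, match (ps.foldl (fun d p => d.modify p.1 PySem.Dict.empty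
            (fun pw => pw.insert p.2 (pw.getD p.2 0 + 1)))
            (PySem.Dict.empty : PySem.Dict String (PySem.Dict String Int))).get? w with
          | some pw => pvBest pw.items
          | none => pvBest (PySem.Dict.counter (ps.map (fun p => p.2))).items) := by
  simp only [PySem.Dict.keys_counter]
  set D := (PySem.Set.ofList ps).foldl (fun d tag =>
      if d.contains tag.1 then d.modify tag.1 [] (· ++ [(tag.2, (PySem.Dict.counter ps).getD tag 0)])
      else (d.insert tag.1 []).modify tag.1 [] (· ++ [(tag.2, (PySem.Dict.counter ps).getD tag 0)])) PySem.Dict.empty with hD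
  set D2 := D.keys.foldl (fun d words =>
      d.insert words (PySem.List.sorted (d.getD words []) (fun x => x.2))) D with hD2
  set WC := ps.foldl (fun d p => d.modify p.1 PySem.Dict.empty
      (fun pw => pw.insert p.2 (pw.getD p.2 0 + 1)))
      (PySem.Dict.empty : PySem.Dict String (PySem.Dict String Int)) with hWC
  have hnd : D.keys.Nodup := by rw [hD]; exact dictA_nodup _ _
  have hDcont : ∀ x, D.contains x = (PySem.Set.ofList ps).any (fun k => k.1 == x) := by
    intro x
    rw [hD, dictA_contains, PySem.Dict.contains_empty, Bool.false_or]
  have hD2cont : ∀ x, D2.contains x = D.contains x := by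
    intro x
    rw [hD2]
    exact sortFold_contains _ _ _ (fun k hk => (PySem.Dict.contains_iff_mem_keys _ _).2 hk)
  have hWCkeys : WC.keys = PySem.Set.ofList (ps.map (fun p => p.1)) := by
    have h := PySem.Dict.keys_foldl_modify_key ps (fun p => p.1)
      (PySem.Dict.empty : PySem.Dict String Int)
      (fun _ p => fun pw => pw.insert p.2 (pw.getD p.2 0 + 1))
      (PySem.Dict.empty : PySem.Dict String (PySem.Dict String Int))
    rw [hWC, h, PySem.Dict.keys_empty]
    exact (PySem.Set.ofList_eq_foldl _).symm
  by_cases hw : ∃ p ∈ ps, p.1 = w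
  · -- known word
    obtain ⟨p0, hp0, hp0w⟩ := hw
    have hDc : D.contains w = true := by
      rw [hDcont, List.any_eq_true]
      exact ⟨p0, (PySem.Set.mem_ofList _ _).2 hp0, by simpa using hp0w⟩
    have hD2c : D2.contains w = true := by rw [hD2cont]; exact hDc
    rw [if_pos hD2c]
    have hD2get : D2.getD w [] = PySem.List.sorted (D.getD w []) (fun x => x.2) := by
      rw [hD2, sortFold_getD _ hnd, if_pos ((PySem.Dict.contains_iff_mem_keys _ _).1 hDc)]
    have hlist : D.getD w [] =
        (PySem.Dict.counter ((ps.filter (fun p => p.1 == w)).map (fun p => p.2))).items := by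
      rw [hD, dictA_getD, PySem.Dict.items_counter]
      rw [ofList_map_snd w _ (fun p hp => by simpa using (List.mem_filter.1 hp).2), ofList_filter]
      rw [List.map_map]
      apply List.map_congr_left
      intro k hk
      have hk1 : k.1 = w := by simpa using (List.mem_filter.1 hk).2
      simp only [Function.comp_apply, PySem.Dict.getD_counter, count_tags]
      rw [show (w, k.2) = k from Prod.ext hk1.symm rfl]
    have hsome : WC.get? w = some (PySem.Dict.counter ((ps.filter (fun p => p.1 == w)).map (fun p => p.2))) := by
      have hmem : w ∈ WC.keys := by
        rw [hWCkeys]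
        exact (PySem.Set.mem_ofList _ _).2 (List.mem_map.2 ⟨p0, hp0, hp0w⟩)
      cases hg : WC.get? w with
      | none => exact absurd hmem ((PySem.Dict.get?_eq_none_iff_not_mem_keys _ _).1 hg)
      | some pw =>
        have hval : WC.getD w PySem.Dict.empty = pw := PySem.Dict.getD_of_get?_eq_some _ _ hg
        rw [hWC, wc_getD_counter] at hval
        rw [← hval]
    rw [hsome]
    rw [hD2get, best_eq, hlist]
  · -- unknown word
    have hDc : D.contains w = false := by
      rw [hDcont]
      rw [Bool.eq_false_iff]
      intro hcon
      obtain ⟨k, hk, hk2⟩ := List.any_eq_true.1 hcon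
      exact hw ⟨k, (PySem.Set.mem_ofList _ _).1 hk, by simpa using hk2⟩
    have hD2c : D2.contains w = false := by rw [hD2cont]; exact hDc
    rw [if_neg (by rw [hD2c]; simp)]
    have hnone : WC.get? w = none := by
      rw [PySem.Dict.get?_eq_none_iff_not_mem_keys, hWCkeys]
      intro hmem
      obtain ⟨p, hp, hpw⟩ := List.mem_map.1 ((PySem.Set.mem_ofList _ _).1 hmem)
      exact hw ⟨p, hp, hpw⟩
    rw [hnone]
    have hrank : (PySem.Set.ofList (ps.map (fun p => p.2))).map
        (fun k => (k, (PySem.Dict.counter (ps.map (fun p => p.2))).getD k 0))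
        = (PySem.Dict.counter (ps.map (fun p => p.2))).items := by
      rw [← PySem.Dict.keys_counter]
      exact (PySem.Dict.items_eq_map_keys _ (PySem.Dict.nodup_keys_counter _) 0).symm
    rw [hrank, best_eq]

-- the two ports agree on every input
theorem ports_eq (train : List (List (String × String))) (test : List (List String)) :
    viterbi_p1 train test = viterbi_p1_alt train test := by
  simp only [viterbi_p1, viterbi_p1_alt]
  rw [← List.foldl_flatten, ← List.foldl_flatten]
  rw [PySem.List.foldl_prod_mk
    (f := fun (d : PySem.Dict (String × String) Int) (the_word : String × String) =>
      if d.contains the_word then d.insert the_word (d.getD the_word 0 + 1) else d.insert the_word 1)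
    (g := fun (d : PySem.Dict String Int) (the_word : String × String) =>
      if d.contains the_word.2 then d.insert the_word.2 (d.getD the_word.2 0 + 1) else d.insert the_word.2 1)]
  rw [PySem.List.foldl_prod_mk
    (f := fun (d : PySem.Dict String Int) (wt : String × String) => d.insert wt.2 (d.getD wt.2 0 + 1))
    (g := fun (d : PySem.Dict String (PySem.Dict String Int)) (wt : String × String) =>
      d.modify wt.1 PySem.Dict.empty (fun pw => pw.insert wt.2 (pw.getD wt.2 0 + 1)))]
  rw [counter_fold]
  have hmy : train.flatten.foldl (fun (d : PySem.Dict String Int) (e : String × String) =>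
      if d.contains e.2 then d.insert e.2 (d.getD e.2 0 + 1) else d.insert e.2 1) PySem.Dict.empty
      = PySem.Dict.counter (train.flatten.map (fun p => p.2)) := by
    rw [← counter_fold, List.foldl_map]
  rw [hmy]
  have htc : train.flatten.foldl (fun (d : PySem.Dict String Int) (e : String × String) =>
      d.insert e.2 (d.getD e.2 0 + 1)) PySem.Dict.empty
      = PySem.Dict.counter (train.flatten.map (fun p => p.2)) := by
    rw [← PySem.Dict.foldl_insert_getD_add_one_eq_counter, List.foldl_map]
  rw [htc]
  simp only [foldl_if_append, PySem.List.foldl_append_singleton_eq_map, List.nil_append]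
  apply List.map_congr_left
  intro sentence _
  apply List.map_congr_left
  intro word _
  exact word_eq train.flatten word

-- ===== VERDICT (by name: the statement is the Claim_ definition above) =====
theorem viterbi_p1_spec : Claim_equal_viterbi_p1 := by
  intro train test _ _
  exact ports_eq train test
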